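-- pv_equiv track=rewrite | github.com/GLaDOS-Michigan/pitometer | measurements/experiments-aws-failure/analyze_failure_final.py | compute_actual_node
-- ===== SOURCE A (Python) =====
-- THROW=1  # Ignore the first THROW requests in computing method latencies
--
-- def compute_actual_node(total_node_data_f):
--     """maps total_node_data to res: method_name -> list of latencies
--     Args:
--         total_node_data : total_node_data_f[node_id][method_name][trial] = list of durations
--     """
--     res = dict()
--     for node in total_node_data_f:
--         for method in total_node_data_f[node]:
--             if method not in res:
--                     res[method] = []
--             for t in total_node_data_f[node][method]:
--                 res[method].extend(total_node_data_f[node][method][t][THROW:-THROW])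
--     return res
-- ===== SOURCE B (Python) =====
-- THROW = 1  # Ignore the first THROW requests in computing method latencies
--
-- def compute_actual_node(total_node_data_f):
--     """Group-by re-implementation: first collect all method names (first-occurrence
--     order), then build each method's combined latency list in one comprehension."""
--     methods = list(dict.fromkeys(
--         m for nd in total_node_data_f.values() for m in nd))
--     return {m: [d
--                 for nd in total_node_data_f.values()
--                 for trials in ([nd[m]] if m in nd else [])
--                 for tr in trials.values()
--                 for d in tr[THROW:-THROW]]
--             for m in methods}
-- ===== Notes on version B (the rewrite author's own statement) =====
-- stated objective: alternative
-- what changed: Inverted the control flow: instead of one accumulating pass that mutates a growing dict per (node, method, trial), B first collects the ordered set of method names and then builds the result as a dict comprehension, concatenating each method's trimmed trial lists across nodes.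
import Mathlib
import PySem

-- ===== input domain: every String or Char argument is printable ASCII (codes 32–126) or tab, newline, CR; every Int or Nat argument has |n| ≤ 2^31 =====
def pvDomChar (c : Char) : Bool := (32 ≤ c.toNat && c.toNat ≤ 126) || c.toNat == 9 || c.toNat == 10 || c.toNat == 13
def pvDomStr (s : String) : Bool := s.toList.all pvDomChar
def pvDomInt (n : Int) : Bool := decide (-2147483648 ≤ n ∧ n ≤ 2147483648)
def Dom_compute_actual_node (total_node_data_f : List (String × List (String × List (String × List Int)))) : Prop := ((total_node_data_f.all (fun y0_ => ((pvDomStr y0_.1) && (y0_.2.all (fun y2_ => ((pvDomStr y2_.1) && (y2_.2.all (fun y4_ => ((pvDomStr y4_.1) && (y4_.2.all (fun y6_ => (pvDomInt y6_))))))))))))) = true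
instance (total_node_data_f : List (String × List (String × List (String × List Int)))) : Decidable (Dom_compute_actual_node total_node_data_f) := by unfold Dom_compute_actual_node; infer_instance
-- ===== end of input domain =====

-- B inverts A's single accumulating pass into an index-first group-by; same cost (objective: alternative).

-- ===== PORT A =====
-- res[method].extend(tnd[node][method][t][THROW:-THROW]) with THROW = 1
def compute_actual_node (total_node_data_f : List (String × List (String × List (String × List Int)))) : List (String × List Int) :=
  (total_node_data_f.foldl
    (fun res node =>
      node.2.foldl
        (fun res mp =>
          mp.2.foldl
            (fun res tp => res.modify mp.1 [] (fun v => v ++ PySem.List.slice tp.2 (some 1) (some (-1))))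
            (if res.contains mp.1 then res else res.insert mp.1 []))
        res)
    PySem.Dict.empty).items

-- ===== PORT B =====
-- trials = nd[m] if m in nd else nothing  (first-match dict lookup)
def pvAltCollect (m : String) (nd : List (String × List (String × List Int))) : List Int :=
  match (PySem.Dict.mk nd).get? m with
  | some trials => trials.flatMap (fun tp => PySem.List.slice tp.2 (some 1) (some (-1)))
  | none => []

def compute_actual_node_alt (total_node_data_f : List (String × List (String × List (String × List Int)))) : List (String × List Int) :=
  let methods := PySem.List.dedup (total_node_data_f.flatMap (fun node => node.2.map (·.1)))
  methods.map (fun m => (m, total_node_data_f.flatMap (fun node => pvAltCollect m node.2)))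

-- ===== PRECONDITION & SPEC =====
-- Pre_ requires each node's inner method association list to have distinct keys: it is the image of a
-- Python dict, which cannot hold duplicate keys, so Pre_ excludes no input the Python A ever receives.
def Pre_compute_actual_node (total_node_data_f : List (String × List (String × List (String × List Int)))) : Prop :=
  ∀ node ∈ total_node_data_f, (node.2.map (·.1)).Nodup
instance (total_node_data_f : List (String × List (String × List (String × List Int)))) : Decidable (Pre_compute_actual_node total_node_data_f) := by unfold Pre_compute_actual_node; infer_instance

def pvWitness_compute_actual_node : (List (String × List (String × List (String × List Int)))) :=
  [("n0", [("get", [("t0", [3, 5, 7]), ("t1", [2])]), ("put", [("t0", [1, 4, 9])])]),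
   ("n1", [("put", [("t0", [8, 8])])])]

def Spec_compute_actual_node (total_node_data_f : List (String × List (String × List (String × List Int)))) (out : List (String × List Int)) : Prop := out = compute_actual_node_alt total_node_data_f
instance (total_node_data_f : List (String × List (String × List (String × List Int)))) (out : List (String × List Int)) : Decidable (Spec_compute_actual_node total_node_data_f out) := by unfold Spec_compute_actual_node; infer_instance

-- ===== CLAIM (what is proved, stated in full; the proofs are below) =====
def Claim_equal_compute_actual_node : Prop := ∀ (total_node_data_f : List (String × List (String × List (String × List Int)))), Dom_compute_actual_node total_node_data_f → Pre_compute_actual_node total_node_data_f → Spec_compute_actual_node total_node_data_f (compute_actual_node total_node_data_f)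

-- ===== LEMMAS AND PROOFS =====

-- the inner trial loop: getD
theorem pv_trials_getD (m k : String) (g : String × List Int → List Int) :
    ∀ (ts : List (String × List Int)) (r : PySem.Dict String (List Int)),
    (ts.foldl (fun r tp => r.modify m [] (fun v => v ++ g tp)) r).getD k []
      = if k = m then r.getD m [] ++ ts.flatMap g else r.getD k [] := by
  intro ts
  induction ts with
  | nil => intro r; by_cases h : k = m <;> simp [h]
  | cons t ts ih =>
    intro r
    simp only [List.foldl_cons, ih, PySem.Dict.getD_modify]
    by_cases h : k = m <;> simp [h, List.flatMap_cons]

-- the inner trial loop keeps the keys when m is already present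
theorem pv_trials_keys (m : String) (g : String × List Int → List Int) :
    ∀ (ts : List (String × List Int)) (r : PySem.Dict String (List Int)),
    r.contains m = true →
    (ts.foldl (fun r tp => r.modify m [] (fun v => v ++ g tp)) r).keys = r.keys := by
  intro ts
  induction ts with
  | nil => intro r _; rfl
  | cons t ts ih =>
    intro r hc
    simp only [List.foldl_cons]
    rw [ih _ (by simp [PySem.Dict.contains_modify, hc])]
    rw [PySem.Dict.keys_modify, PySem.Dict.keys_insert_of_contains _ _ hc]

-- one (method, trials) step of A: getD
theorem pv_stepM_getD (g : String × List Int → List Int)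
    (r : PySem.Dict String (List Int)) (mp : String × List (String × List Int)) (k : String) :
    (mp.2.foldl (fun r tp => r.modify mp.1 [] (fun v => v ++ g tp))
       (if r.contains mp.1 then r else r.insert mp.1 [])).getD k []
      = if k = mp.1 then r.getD mp.1 [] ++ mp.2.flatMap g else r.getD k [] := by
  rw [pv_trials_getD]
  by_cases hc : r.contains mp.1
  · simp [hc]
  · simp only [Bool.not_eq_true] at hc
    by_cases hk : k = mp.1 <;>
      simp [hc, hk, PySem.Dict.getD_insert, PySem.Dict.getD_of_not_contains _ _ hc]

-- one (method, trials) step of A: keys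
theorem pv_stepM_keys (g : String × List Int → List Int)
    (r : PySem.Dict String (List Int)) (mp : String × List (String × List Int)) :
    (mp.2.foldl (fun r tp => r.modify mp.1 [] (fun v => v ++ g tp))
       (if r.contains mp.1 then r else r.insert mp.1 [])).keys
      = PySem.Set.add r.keys mp.1 := by
  by_cases hc : r.contains mp.1
  · rw [if_pos hc, pv_trials_keys _ _ _ _ hc]
    have hmem : mp.1 ∈ r.keys := (PySem.Dict.contains_iff_mem_keys r mp.1).1 hc
    simp [PySem.Set.add, hmem]
  · simp only [Bool.not_eq_true] at hc
    rw [if_neg (by simp [hc]),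
        pv_trials_keys _ _ _ _ (PySem.Dict.contains_insert_self r mp.1 []),
        PySem.Dict.keys_insert_of_not_contains _ _ hc]
    have hmem : mp.1 ∉ r.keys := fun h => by
      simp [(PySem.Dict.contains_iff_mem_keys r mp.1).2 h] at hc
    simp [PySem.Set.add, hmem]

-- one node of A (the method loop): getD
theorem pv_stepN_getD (g : String × List Int → List Int) (k : String) :
    ∀ (nd : List (String × List (String × List Int))) (r : PySem.Dict String (List Int)),
    (nd.foldl (fun res mp =>
        mp.2.foldl (fun res tp => res.modify mp.1 [] (fun v => v ++ g tp))
          (if res.contains mp.1 then res else res.insert mp.1 [])) r).getD k []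
      = r.getD k [] ++ (nd.filter (fun mp => mp.1 == k)).flatMap (fun mp => mp.2.flatMap g) := by
  intro nd
  induction nd with
  | nil => intro r; simp
  | cons mp nd ih =>
    intro r
    simp only [List.foldl_cons, ih, pv_stepM_getD, List.filter_cons]
    by_cases h : k = mp.1
    · simp [h, List.append_assoc]
    · have hne : ¬ mp.1 = k := fun hh => h hh.symm
      have : (mp.1 == k) = false := by simp [hne]
      simp [this, h]

-- one node of A: keys
theorem pv_stepN_keys (g : String × List Int → List Int) :
    ∀ (nd : List (String × List (String × List Int))) (r : PySem.Dict String (List Int)),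
    (nd.foldl (fun res mp =>
        mp.2.foldl (fun res tp => res.modify mp.1 [] (fun v => v ++ g tp))
          (if res.contains mp.1 then res else res.insert mp.1 [])) r).keys
      = PySem.Set.update r.keys (nd.map (·.1)) := by
  intro nd
  induction nd with
  | nil => intro r; simp [PySem.Set.update]
  | cons mp nd ih =>
    intro r
    simp only [List.foldl_cons, ih, pv_stepM_keys, List.map_cons, PySem.Set.update]

-- Set.update distributes over ++
theorem pv_update_append {s : List String} (xs ys : List String) :
    PySem.Set.update s (xs ++ ys) = PySem.Set.update (PySem.Set.update s xs) ys := by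
  simp [PySem.Set.update, List.foldl_append]

-- the whole node loop of A: getD
theorem pv_top_getD (g : String × List Int → List Int) (k : String) :
    ∀ (tnd : List (String × List (String × List (String × List Int)))) (r : PySem.Dict String (List Int)),
    (tnd.foldl (fun res node =>
        node.2.foldl (fun res mp =>
          mp.2.foldl (fun res tp => res.modify mp.1 [] (fun v => v ++ g tp))
            (if res.contains mp.1 then res else res.insert mp.1 [])) res) r).getD k []
      = r.getD k [] ++ tnd.flatMap (fun node =>
          (node.2.filter (fun mp => mp.1 == k)).flatMap (fun mp => mp.2.flatMap g)) := by
  intro tnd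
  induction tnd with
  | nil => intro r; simp
  | cons node tnd ih =>
    intro r
    simp only [List.foldl_cons, ih, pv_stepN_getD, List.flatMap_cons, List.append_assoc]

-- the whole node loop of A: keys
theorem pv_top_keys (g : String × List Int → List Int) :
    ∀ (tnd : List (String × List (String × List (String × List Int)))) (r : PySem.Dict String (List Int)),
    (tnd.foldl (fun res node =>
        node.2.foldl (fun res mp =>
          mp.2.foldl (fun res tp => res.modify mp.1 [] (fun v => v ++ g tp))
            (if res.contains mp.1 then res else res.insert mp.1 [])) res) r).keys
      = PySem.Set.update r.keys (tnd.flatMap (fun node => node.2.map (·.1))) := by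
  intro tnd
  induction tnd with
  | nil => intro r; simp [PySem.Set.update]
  | cons node tnd ih =>
    intro r
    simp only [List.foldl_cons, ih, pv_stepN_keys, List.flatMap_cons, pv_update_append]

-- with distinct method keys, scanning all matches equals the first-match lookup of B
theorem pv_first_match (g : String × List Int → List Int) (k : String) :
    ∀ (nd : List (String × List (String × List Int))), (nd.map (·.1)).Nodup →
    (nd.filter (fun mp => mp.1 == k)).flatMap (fun mp => mp.2.flatMap g)
      = match (PySem.Dict.mk nd).get? k with
        | some trials => trials.flatMap g
        | none => [] := by
  intro nd
  induction nd with
  | nil => intro _; simp [PySem.Dict.get?]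
  | cons p nd ih =>
    intro h
    simp only [List.map_cons, List.nodup_cons] at h
    rw [List.filter_cons, PySem.Dict.get?_mk_cons]
    by_cases hp : p.1 == k
    · have hk : p.1 = k := by simpa using hp
      have hrest : nd.filter (fun mp => mp.1 == k) = [] := by
        rw [List.filter_eq_nil_iff]
        intro mp hmp
        have : mp.1 ∈ nd.map (·.1) := List.mem_map_of_mem hmp
        simp only [beq_iff_eq]
        intro he
        exact h.1 (by rw [hk, ← he]; exact this)
      simp [hp, hrest]
    · simp only [Bool.not_eq_true] at hp
      simp [hp, ih h.2]

-- a flatMap congruence over members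
theorem pv_flatMap_congr {α β : Type} {l : List α} {f g : α → List β}
    (h : ∀ a ∈ l, f a = g a) : l.flatMap f = l.flatMap g := by
  simp only [List.flatMap_def]
  exact congrArg List.flatten (List.map_congr_left h)

-- ===== VERDICT (by name: the statement is the Claim_ definition above) =====
theorem compute_actual_node_spec : Claim_equal_compute_actual_node := by
  intro tnd _ hpre
  unfold Spec_compute_actual_node compute_actual_node compute_actual_node_alt
  have hkeys := pv_top_keys (fun tp => PySem.List.slice tp.2 (some 1) (some (-1))) tnd PySem.Dict.empty
  rw [PySem.Dict.keys_empty, PySem.Set.update_nil_left] at hkeys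
  have hnd : (List.foldl (fun res node =>
      List.foldl (fun res mp =>
        List.foldl (fun res tp => res.modify mp.1 [] fun v => v ++ PySem.List.slice tp.2 (some 1) (some (-1)))
          (if res.contains mp.1 = true then res else res.insert mp.1 []) mp.2) res node.2)
      PySem.Dict.empty tnd).keys.Nodup := by
    rw [hkeys]; exact PySem.Set.nodup_ofList _
  rw [PySem.Dict.items_eq_map_keys _ hnd [], hkeys]
  simp only [PySem.List.dedup_eq_ofList]
  apply List.map_congr_left
  intro k hk
  rw [pv_top_getD, PySem.Dict.getD_empty, List.nil_append]
  refine congrArg (Prod.mk k) (pv_flatMap_congr ?_)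
  intro node hn
  rw [pv_first_match _ _ _ (hpre node hn)]
  rfl
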